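-- pv_equiv track=rewrite | github.com/MAlshaik/CSE231 | project6.py | get_region_list
-- ===== SOURCE A (Python) =====
-- def get_region_list (master_list):
--     '''Retrieve all regions into a sorted non duplicate list'''
--     if len(master_list) == 0: return []
--
--     sorted_list = []
--     for tup in master_list:
--         if tup[-1] == '': sorted_list.append(None)
--         else: sorted_list.append(tup[-1])
--
--     sorted_list = set(sorted_list)
--
--     if None in sorted_list:
--         sorted_list.remove(None)
--         sorted_list = sorted(sorted_list)
--     else:
--         sorted_list = sorted(sorted_list)
--
--     if len(sorted_list) == 1 and sorted_list[0] == None: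
--         return []
--
--     return sorted_list
-- ===== SOURCE B (Python) =====
-- def get_region_list(master_list):
--     '''Retrieve all regions into a sorted non duplicate list'''
--     vals = sorted(t[-1] for t in master_list if t[-1] != '')
--     out = []
--     for v in vals:
--         if not out or out[-1] != v:
--             out.append(v)
--     return out
-- ===== Notes on version B (the rewrite author's own statement) =====
-- stated objective: alternative
-- what changed: B drops the ''->None sentinel and the hash set entirely: it filters out '' while collecting last elements, sorts the multiset, and deduplicates in one adjacent-compare scan over the sorted list.
import Mathlib
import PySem

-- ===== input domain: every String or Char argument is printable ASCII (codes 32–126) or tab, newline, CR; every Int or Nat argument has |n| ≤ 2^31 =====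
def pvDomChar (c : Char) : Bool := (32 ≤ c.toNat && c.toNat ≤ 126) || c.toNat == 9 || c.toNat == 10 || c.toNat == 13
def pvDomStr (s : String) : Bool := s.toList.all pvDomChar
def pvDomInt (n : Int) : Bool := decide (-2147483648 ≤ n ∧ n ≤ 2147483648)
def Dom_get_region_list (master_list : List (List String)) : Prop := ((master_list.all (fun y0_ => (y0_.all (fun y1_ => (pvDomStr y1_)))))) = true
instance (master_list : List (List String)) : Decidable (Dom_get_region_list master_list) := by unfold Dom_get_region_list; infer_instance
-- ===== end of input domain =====

-- B replaces A's ''→None sentinel and hash set by filter + sort + one adjacent-dedup scan (alternative decomposition, same cost).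

-- ===== PORT A =====
def get_region_list (master_list : List (List String)) : List String :=
  if master_list.length = 0 then [] else
  let sorted_list : List (Option String) :=
    master_list.foldl (fun acc tup =>
      match PySem.List.pyGet? tup (-1) with
      | some l => if l = "" then acc ++ [none] else acc ++ [some l]
      | none => acc ++ [none]) []        -- none case unreachable under Pre_ (tup[-1] is an IndexError)
  let s : PySem.Set (Option String) := PySem.Set.ofList sorted_list
  let sl : List (Option String) :=
    if PySem.Set.contains s none then
      PySem.List.sorted ((PySem.Set.remove? s none).getD s) (fun o => o.getD "") false
    else
      PySem.List.sorted s (fun o => o.getD "") false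
  if sl.length = 1 ∧ sl[0]? = some none then []
  else sl.filterMap id

-- ===== PORT B =====
def get_region_list_alt (master_list : List (List String)) : List String :=
  let vals : List String := master_list.filterMap (fun tup =>
    match PySem.List.pyGet? tup (-1) with
    | some l => if l = "" then none else some l
    | none => none)
  let sortedv := PySem.List.sorted vals (fun x => x) false
  sortedv.foldl (fun out v => if out.getLast? = some v then out else out ++ [v]) []

-- ===== PRECONDITION & SPEC =====
-- Pre_ excludes inputs containing an empty inner tuple: there tup[-1] raises IndexError in A (and in B).
def Pre_get_region_list (master_list : List (List String)) : Prop :=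
  ∀ tup ∈ master_list, tup ≠ []
instance (master_list : List (List String)) : Decidable (Pre_get_region_list master_list) := by
  unfold Pre_get_region_list; infer_instance
def pvWitness_get_region_list : List (List String) := [["x", "a"], ["b"], ["", ""], ["a"]]

def Spec_get_region_list (master_list : List (List String)) (out : List String) : Prop := out = get_region_list_alt master_list
instance (master_list : List (List String)) (out : List String) : Decidable (Spec_get_region_list master_list out) := by unfold Spec_get_region_list; infer_instance

-- ===== CLAIM (what is proved, stated in full; the proofs are below) =====
def Claim_equal_get_region_list : Prop := ∀ (master_list : List (List String)), Dom_get_region_list master_list → Pre_get_region_list master_list → Spec_get_region_list master_list (get_region_list master_list)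

-- ===== LEMMAS AND PROOFS =====

-- A's and B's shared view of tup[-1] on a nonempty tuple
theorem pvGetLast (tup : List String) (h : tup ≠ []) :
    PySem.List.pyGet? tup (-1) = some (tup.getLast?.getD "") := by
  cases tup with
  | nil => exact absurd rfl h
  | cons a t =>
    simp [PySem.List.pyGet?, PySem.List.pyIdx?, List.getLast?_eq_getElem?]

-- the '' → None embedding A's first loop applies to each last element
def pvEmb (x : String) : Option String := if x = "" then none else some x

-- B's dedup scan over a ≤-sorted list: result is <-sorted with the same members
theorem dedup_scan_invariant (l : List String) :
    ∀ acc : List String, l.Pairwise (· ≤ ·) → acc.Pairwise (· < ·) →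
    (∀ a ∈ acc, ∀ x ∈ l, a ≤ x) →
    (l.foldl (fun out v => if out.getLast? = some v then out else out ++ [v]) acc).Pairwise (· < ·) ∧
    ∀ y, (y ∈ l.foldl (fun out v => if out.getLast? = some v then out else out ++ [v]) acc ↔ y ∈ acc ∨ y ∈ l) := by
  induction l with
  | nil => intro acc _ hacc _; simpa using hacc
  | cons v l ih =>
    intro acc hl hacc hle
    have hl' : l.Pairwise (· ≤ ·) := hl.tail
    have hvle : ∀ x ∈ l, v ≤ x := (List.pairwise_cons.mp hl).1
    simp only [List.foldl_cons]
    by_cases hgl : acc.getLast? = some v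
    · have hv : v ∈ acc := List.mem_of_getLast? hgl
      have := ih acc hl' hacc (fun a ha x hx => hle a ha x (List.mem_cons_of_mem _ hx))
      rw [if_pos hgl]
      refine ⟨this.1, fun y => ?_⟩
      rw [this.2 y]
      constructor
      · rintro (h | h) <;> simp [h]
      · rintro (h | h)
        · exact Or.inl h
        · rcases List.mem_cons.mp h with rfl | h
          · exact Or.inl hv
          · exact Or.inr h
    · have hvnot : v ∉ acc := by
        intro hv
        rcases List.eq_nil_or_concat acc with rfl | ⟨as, b, rfl⟩
        · simp at hv
        rw [List.concat_eq_append] at hv hacc hgl hle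
        have hbv : b ≠ v := by
          intro rfl; exact hgl (by simp)
        have hvas : v ∈ as := by
          rcases List.mem_append.mp hv with h | h
          · exact h
          · simp at h; exact absurd h.symm hbv
        have h1 : v < b := (List.pairwise_append.mp hacc).2.2 v hvas b (by simp)
        have h2 : b ≤ v := hle b (by simp) v List.mem_cons_self
        exact absurd h1 (not_lt.mpr h2)
      have hacc' : (acc ++ [v]).Pairwise (· < ·) := by
        rw [List.pairwise_append]
        refine ⟨hacc, by simp, fun a ha b hb => ?_⟩
        simp at hb; rw [hb]
        have h1 : a ≤ v := hle a ha v List.mem_cons_self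
        have h2 : a ≠ v := fun h => hvnot (h ▸ ha)
        exact lt_of_le_of_ne h1 h2
      have hle' : ∀ a ∈ acc ++ [v], ∀ x ∈ l, a ≤ x := by
        intro a ha x hx
        rcases List.mem_append.mp ha with h | h
        · exact hle a h x (List.mem_cons_of_mem _ hx)
        · simp at h; subst h; exact hvle x hx
      have := ih (acc ++ [v]) hl' hacc' hle'
      rw [if_neg hgl]
      refine ⟨this.1, fun y => ?_⟩
      rw [this.2 y]
      simp [or_assoc, List.mem_cons]

-- A's first loop is the map of pvEmb over last elements
theorem pvA_loop (ms : List (List String)) (h : ∀ t ∈ ms, t ≠ []) (acc : List (Option String)) :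
    ms.foldl (fun acc tup =>
      match PySem.List.pyGet? tup (-1) with
      | some l => if l = "" then acc ++ [none] else acc ++ [some l]
      | none => acc ++ [none]) acc
    = acc ++ ms.map (fun t => pvEmb (t.getLast?.getD "")) := by
  induction ms generalizing acc with
  | nil => simp
  | cons t ms ih =>
    simp only [List.foldl_cons, List.map_cons]
    rw [pvGetLast t (h t List.mem_cons_self)]
    have hih := ih (fun t ht => h t (List.mem_cons_of_mem _ ht))
    by_cases he : t.getLast?.getD "" = "" <;> simp [pvEmb, he, hih]

-- ===== VERDICT (by name: the statement is the Claim_ definition above) =====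
theorem get_region_list_spec : Claim_equal_get_region_list := by
  intro ml _ hpre
  unfold Spec_get_region_list
  by_cases hml : ml.length = 0
  · rw [List.length_eq_zero_iff] at hml
    subst hml
    rfl
  -- shared data
  unfold get_region_list get_region_list_alt
  rw [if_neg hml]
  simp only []
  rw [pvA_loop ml hpre []]
  simp only [List.nil_append]
  -- names for the intermediate data
  set lst : List (Option String) := ml.map (fun t => pvEmb (t.getLast?.getD "")) with hlst
  set vals : List String := ml.filterMap (fun tup =>
    match PySem.List.pyGet? tup (-1) with
    | some l => if l = "" then none else some l
    | none => none) with hvals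
  set B : List String := (PySem.List.sorted vals (fun x => x)).foldl
    (fun out v => if out.getLast? = some v then out else out ++ [v]) [] with hBdef
  -- B's filter agrees with pvEmb of the last element under Pre_
  have hvals_emb : vals = ml.filterMap (fun t => pvEmb (t.getLast?.getD "")) := by
    rw [hvals]
    apply List.filterMap_congr
    intro t ht
    rw [pvGetLast t (hpre t ht)]
    simp [pvEmb]
  have hmem_iff : ∀ y : String, (some y ∈ lst ↔ y ∈ vals) := by
    intro y
    rw [hvals_emb, hlst, List.mem_map, List.mem_filterMap]
  -- B is strictly sorted and holds exactly the members of vals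
  have hB := dedup_scan_invariant (PySem.List.sorted vals (fun x => x)) []
    (PySem.List.sorted_pairwise vals (fun x => x)) (by simp) (by simp)
  rw [← hBdef] at hB
  have hBmem : ∀ y, y ∈ B ↔ y ∈ vals := by
    intro y; rw [hB.2 y]; simp [PySem.List.mem_sorted]
  have hBnd : B.Nodup := hB.1.imp ne_of_lt
  -- the list A sorts (set minus None) is a nodup list of exactly the somes of vals
  have hT0 : ∀ T0 : List (Option String),
      T0.Nodup → (∀ o, o ∈ T0 ↔ ∃ y, o = some y ∧ y ∈ vals) →
      PySem.List.sorted T0 (fun o => o.getD "") = B.map some := by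
    intro T0 hnd hmem
    apply PySem.List.sorted_eq_of_perm_of_pairwise_lt
    · apply (List.perm_ext_iff_of_nodup (hBnd.map (Option.some_injective _)) hnd).mpr
      intro o
      rw [hmem o, List.mem_map]
      constructor
      · rintro ⟨y, hy, rfl⟩; exact ⟨y, rfl, (hBmem y).mp hy⟩
      · rintro ⟨y, rfl, hy⟩; exact ⟨y, (hBmem y).mpr hy, rfl⟩
    · rw [List.pairwise_map]
      exact hB.1.imp (by intro a b h; simpa using h)
  have hsl : (if (PySem.Set.ofList lst).contains none = true then
        PySem.List.sorted (((PySem.Set.ofList lst).remove? none).getD (PySem.Set.ofList lst)) (fun o => o.getD "")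
      else PySem.List.sorted (PySem.Set.ofList lst) (fun o => o.getD "")) = B.map some := by
    by_cases hc : (PySem.Set.ofList lst).contains none = true
    · rw [if_pos hc]
      have hnmem : (none : Option String) ∈ PySem.Set.ofList lst := by
        simpa [PySem.Set.contains] using hc
      rw [PySem.Set.remove?_of_mem hnmem, Option.getD_some]
      apply hT0
      · exact PySem.Set.nodup_discard _ _ (PySem.Set.nodup_ofList lst)
      · intro o
        rw [PySem.Set.mem_discard, PySem.Set.mem_ofList]
        cases o with
        | none => simp
        | some y => simpa using hmem_iff y
    · rw [if_neg hc]
      have hnmem : (none : Option String) ∉ PySem.Set.ofList lst := by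
        simpa [PySem.Set.contains] using hc
      apply hT0
      · exact PySem.Set.nodup_ofList lst
      · intro o
        rw [PySem.Set.mem_ofList]
        cases o with
        | none => simp; exact fun h => hnmem ((PySem.Set.mem_ofList _ _).mpr h)
        | some y => simpa using hmem_iff y
  rw [hsl]
  rw [if_neg]
  · simp [List.filterMap_map]
  · rintro ⟨-, h0⟩
    have : (none : Option String) ∈ B.map some := by
      have hlen : 0 < (B.map some).length := by
        by_contra hlen
        simp at hlen
        rw [hlen] at h0
        simp at h0
      have hg := List.getElem?_eq_getElem hlen
      rw [h0] at hg
      have hmem := List.getElem_mem hlen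
      rw [show (List.map some B)[0] = (none : Option String) from Option.some_inj.mp hg.symm] at hmem
      exact hmem
    simp at this
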